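-- pv_equiv track=rewrite | github.com/rwydaegh/goliat | goliat/analysis/plots/base.py | _get_academic_markers
-- ===== SOURCE A (Python) =====
-- def _get_academic_markers(n_markers: int) -> list:
--     """Returns a list of academic/professional markers for publication-quality plots.
--
--     Markers cycle if more than available are requested.
--
--     Args:
--         n_markers: Number of markers needed.
--
--     Returns:
--         List of marker specifications.
--     """
--     base_markers = [
--         "o",  # 0: circle
--         "s",  # 1: square
--         "^",  # 2: triangle up
--         "D",  # 3: diamond
--         "v",  # 4: triangle down
--         "p",  # 5: pentagon
--         "h",  # 6: hexagon
--         "*",  # 7: star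
--         "X",  # 8: x (filled)
--         "P",  # 9: plus (filled)
--     ]
--
--     if n_markers <= len(base_markers):
--         return base_markers[:n_markers]
--     else:
--         markers = []
--         for i in range(n_markers):
--             markers.append(base_markers[i % len(base_markers)])
--         return markers
-- ===== SOURCE B (Python) =====
-- def _get_academic_markers(n_markers: int) -> list:
--     base_markers = ["o", "s", "^", "D", "v", "p", "h", "*", "X", "P"]
--     q, r = divmod(n_markers, len(base_markers))
--     if q <= 0:
--         return base_markers[:n_markers]
--     return base_markers * q + base_markers[:r]
-- ===== Notes on version B (the rewrite author's own statement) =====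
-- stated objective: idiomatic
-- what changed: Replaces the per-index loop with modulo indexing by whole-list tiling: divmod gives quotient and remainder, and the result is base_markers * q + base_markers[:r] (slice fallback for q <= 0 keeps negative/small n exact); list repetition avoids n Python-level iterations.
import Mathlib
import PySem

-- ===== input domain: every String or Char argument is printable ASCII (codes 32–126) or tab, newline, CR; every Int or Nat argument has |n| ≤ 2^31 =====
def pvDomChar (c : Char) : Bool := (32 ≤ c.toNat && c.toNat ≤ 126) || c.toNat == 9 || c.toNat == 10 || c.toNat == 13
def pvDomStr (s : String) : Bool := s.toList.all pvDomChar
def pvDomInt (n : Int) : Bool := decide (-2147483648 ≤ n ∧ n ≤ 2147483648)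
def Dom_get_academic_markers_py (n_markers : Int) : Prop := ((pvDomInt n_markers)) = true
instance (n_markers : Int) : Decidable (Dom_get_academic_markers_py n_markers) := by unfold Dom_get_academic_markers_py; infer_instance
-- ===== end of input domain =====

-- B tiles the marker list with divmod (base * q + base[:r]) instead of looping with modulo indexing; same values, more idiomatic.


-- ===== PORT A =====
-- the base_markers list, shared literal
def pvBaseMarkers : List String := ["o", "s", "^", "D", "v", "p", "h", "*", "X", "P"]

def get_academic_markers_py (n_markers : Int) : List String :=
  if n_markers ≤ (pvBaseMarkers.length : Int) then
    PySem.List.slice pvBaseMarkers none (some n_markers)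
  else
    (PySem.List.pyRange 0 n_markers 1).foldl
      (fun markers i =>
        markers ++ [PySem.List.pyGetD pvBaseMarkers (PySem.Int.mod i (pvBaseMarkers.length : Int)) ""])
      []

-- ===== PORT B =====
def get_academic_markers_py_alt (n_markers : Int) : List String :=
  let q := PySem.Int.floordiv n_markers (pvBaseMarkers.length : Int)
  let r := PySem.Int.mod n_markers (pvBaseMarkers.length : Int)
  if q ≤ 0 then
    PySem.List.slice pvBaseMarkers none (some n_markers)
  else
    (List.replicate q.toNat pvBaseMarkers).flatten ++ PySem.List.slice pvBaseMarkers none (some r)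

-- ===== PRECONDITION & SPEC =====
def Spec_get_academic_markers_py (n_markers : Int) (out : List String) : Prop := out = get_academic_markers_py_alt n_markers
instance (n_markers : Int) (out : List String) : Decidable (Spec_get_academic_markers_py n_markers out) := by unfold Spec_get_academic_markers_py; infer_instance

-- ===== CLAIM (what is proved, stated in full; the proofs are below) =====
def Claim_equal_get_academic_markers_py : Prop := ∀ (n_markers : Int), Dom_get_academic_markers_py n_markers → Spec_get_academic_markers_py n_markers (get_academic_markers_py n_markers)

-- ===== LEMMAS AND PROOFS =====

-- one full block of ten markers: mapping the mod-10 lookup over range 10 reproduces the list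
theorem pvBlock_eq :
    (List.range 10).map (fun k => pvBaseMarkers.getD (k % 10) "") = pvBaseMarkers := by
  decide

-- shifting the index by 10 does not change the lookup
theorem pvLookup_shift (k : Nat) :
    pvBaseMarkers.getD ((10 + k) % 10) "" = pvBaseMarkers.getD (k % 10) "" := by
  simp [Nat.add_mod_left]

-- the modulo-lookup map over range (10*q + r) is q tiles of the base list plus a partial tile
theorem pvTile (q r : Nat) (hr : r ≤ 10) :
    (List.range (10 * q + r)).map (fun k => pvBaseMarkers.getD (k % 10) "") =
      (List.replicate q pvBaseMarkers).flatten ++ pvBaseMarkers.take r := by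
  induction q with
  | zero =>
      simp only [Nat.mul_zero, Nat.zero_add, List.replicate_zero, List.flatten_nil, List.nil_append]
      interval_cases r <;> decide
  | succ q ih =>
      have h : 10 * (q + 1) + r = 10 + (10 * q + r) := by ring
      rw [h, List.range_add, List.map_append, List.map_map]
      have h2 : ((fun k => pvBaseMarkers.getD (k % 10) "") ∘ (fun k => 10 + k)) =
          (fun k => pvBaseMarkers.getD (k % 10) "") := by
        funext k; exact pvLookup_shift k
      rw [h2, ih, pvBlock_eq, List.replicate_succ, List.flatten_cons, List.append_assoc]

-- ===== VERDICT (by name: the statement is the Claim_ definition above) =====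
theorem get_academic_markers_py_spec : Claim_equal_get_academic_markers_py := by
  intro n _
  unfold Spec_get_academic_markers_py get_academic_markers_py get_academic_markers_py_alt
  rw [show ((pvBaseMarkers.length : Int)) = 10 from by decide]
  by_cases hle : n ≤ (10 : Int)
  · -- A takes the slice branch
    rw [if_pos hle]
    by_cases hq : PySem.Int.floordiv n 10 ≤ 0
    · rw [if_pos hq]
    · -- q > 0 with n ≤ 10 forces n = 10: one full tile equals the slice
      rw [if_neg hq]
      have h10 : n = 10 := by
        have hb := PySem.Int.floordiv_mul_add_mod n 10
        have h1 := PySem.Int.mod_nonneg n (b := 10) (by omega)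
        have h2 := PySem.Int.mod_lt n (b := 10) (by omega)
        have hq1 : 1 ≤ PySem.Int.floordiv n 10 := by omega
        have := (PySem.Int.le_floordiv_iff_mul_le (a := n) (b := 10) (q := 1) (by omega)).mp hq1
        omega
      subst h10
      decide
  · -- A takes the loop branch
    rw [if_neg hle]
    have hq1 : 1 ≤ PySem.Int.floordiv n 10 := by
      rw [PySem.Int.le_floordiv_iff_mul_le (by omega)]; omega
    rw [if_neg (by omega : ¬ PySem.Int.floordiv n 10 ≤ 0)]
    rw [PySem.List.foldl_append_singleton_eq_map, List.nil_append]
    set q := PySem.Int.floordiv n 10 with hqdef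
    set r := PySem.Int.mod n 10 with hrdef
    have hb := PySem.Int.floordiv_mul_add_mod n 10
    have hr0 : 0 ≤ r := PySem.Int.mod_nonneg n (b := 10) (by omega)
    have hr10 : r < 10 := PySem.Int.mod_lt n (b := 10) (by omega)
    have hqn : (10:Int) * q ≤ n := by omega
    have hn : (0:Int) ≤ n := by omega
    have hsplit : n.toNat = 10 * q.toNat + r.toNat := by omega
    have hrange : PySem.List.pyRange 0 n 1 = (List.range n.toNat).map (fun k : Nat => (k : Int)) := by
      rw [PySem.List.pyRange_one]
      rw [show ((n : Int) - 0).toNat = n.toNat from by omega]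
      exact List.map_congr_left (fun k _ => by omega)
    rw [hrange, List.map_map]
    have hfun : ((fun i => PySem.List.pyGetD pvBaseMarkers (PySem.Int.mod i 10) "") ∘
        (fun k : Nat => (k : Int))) = (fun k : Nat => pvBaseMarkers.getD (k % 10) "") := by
      funext k
      simp only [Function.comp_apply]
      rw [show (10 : Int) = ((10 : Nat) : Int) from rfl, PySem.Int.mod_natCast,
        PySem.List.pyGetD_natCast]
    rw [hfun, PySem.List.slice_to (xs := pvBaseMarkers) (b := r) hr0, hsplit,
      pvTile q.toNat r.toNat (by omega)]
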